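-- pv_equiv track=rewrite | github.com/kkkkknhh/FARFAN-2.0 | import_analyzer.py | _find_import_blocks
-- ===== SOURCE A (Python) =====
-- from typing import Dict, List, Set, Tuple, Optional, Any
--
-- def _find_import_blocks(lines: List[str]) -> List[Tuple[int, int]]:
--     """Encuentra bloques contiguos de imports"""
--     blocks = []
--     start = None
--
--     for i, line in enumerate(lines):
--         is_import = line.strip().startswith(('import ', 'from '))
--
--         if is_import and start is None:
--             start = i
--         elif not is_import and start is not None:
--             blocks.append((start, i))
--             start = None
--
--     if start is not None:
--         blocks.append((start, len(lines)))
--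
--     return blocks
-- ===== SOURCE B (Python) =====
-- from typing import List, Tuple
--
-- def _find_import_blocks(lines: List[str]) -> List[Tuple[int, int]]:
--     """Scan backwards, prepending runs: extend the front block when adjacent."""
--     blocks: List[Tuple[int, int]] = []
--     for i in range(len(lines) - 1, -1, -1):
--         if lines[i].strip().startswith(('import ', 'from ')):
--             if blocks and blocks[0][0] == i + 1:
--                 blocks[0] = (i, blocks[0][1])
--             else:
--                 blocks.insert(0, (i, i + 1))
--     return blocks
-- ===== Notes on version B (the rewrite author's own statement) =====
-- stated objective: alternative
-- what changed: Replaces the forward scan with an open-block sentinel by a backward scan that prepends (i, i+1) runs and merges the front block when adjacent, with no pending-start state or final flush.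
import Mathlib
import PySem

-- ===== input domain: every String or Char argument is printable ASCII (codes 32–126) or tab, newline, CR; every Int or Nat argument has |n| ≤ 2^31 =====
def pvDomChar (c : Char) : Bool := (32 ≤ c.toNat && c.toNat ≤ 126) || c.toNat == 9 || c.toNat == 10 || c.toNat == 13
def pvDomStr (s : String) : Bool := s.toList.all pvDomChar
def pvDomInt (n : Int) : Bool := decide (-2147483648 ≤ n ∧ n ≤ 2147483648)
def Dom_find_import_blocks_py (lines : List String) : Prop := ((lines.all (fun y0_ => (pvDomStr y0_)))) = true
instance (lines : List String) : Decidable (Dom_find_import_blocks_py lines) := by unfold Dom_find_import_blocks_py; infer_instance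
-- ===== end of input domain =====

-- B scans the lines backwards and prepends/merges runs; A keeps a pending-start sentinel forwards.
-- ===== PORT A =====
def pvIsImp (l : String) : Bool :=
  PySem.Str.startswith (PySem.Str.strip l) "import " || PySem.Str.startswith (PySem.Str.strip l) "from "

def pvAGo : List String → Int → Option Int → List (Int × Int) → List (Int × Int)
  | [], n, start, blocks =>
      match start with
      | some s => blocks ++ [(s, n)]
      | none => blocks
  | l :: rest, i, start, blocks =>
      if pvIsImp l then
        match start with
        | none => pvAGo rest (i + 1) (some i) blocks
        | some _ => pvAGo rest (i + 1) start blocks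
      else
        match start with
        | some s => pvAGo rest (i + 1) none (blocks ++ [(s, i)])
        | none => pvAGo rest (i + 1) start blocks

def find_import_blocks_py (lines : List String) : List (Int × Int) :=
  pvAGo lines 0 none []

-- ===== PORT B =====
-- backward for-loop: the element at index i is processed after all larger indices,
-- so it is the structural recursion whose recursive call handles the tail first.
def pvBGo : List String → Int → List (Int × Int)
  | [], _ => []
  | l :: rest, i =>
      let blocks := pvBGo rest (i + 1)
      if pvIsImp l then
        match blocks with
        | (s, e) :: bs => if s = i + 1 then (i, e) :: bs else (i, i + 1) :: (s, e) :: bs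
        | [] => [(i, i + 1)]
      else blocks

def find_import_blocks_py_alt (lines : List String) : List (Int × Int) :=
  pvBGo lines 0

-- ===== PRECONDITION & SPEC =====
def Spec_find_import_blocks_py (lines : List String) (out : List (Int × Int)) : Prop := out = find_import_blocks_py_alt lines
instance (lines : List String) (out : List (Int × Int)) : Decidable (Spec_find_import_blocks_py lines out) := by unfold Spec_find_import_blocks_py; infer_instance

-- ===== CLAIM (what is proved, stated in full; the proofs are below) =====
def Claim_equal_find_import_blocks_py : Prop := ∀ (lines : List String), Dom_find_import_blocks_py lines → Spec_find_import_blocks_py lines (find_import_blocks_py lines)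

-- ===== LEMMAS AND PROOFS =====
-- merging a new front run (s, i) into blocks whose head (if any) starts at i
def pvMerge (s i : Int) : List (Int × Int) → List (Int × Int)
  | (s', e) :: bs => if s' = i then (s, e) :: bs else (s, i) :: (s', e) :: bs
  | [] => [(s, i)]

lemma pvBGo_head_ge (lines : List String) : ∀ (j s e : Int) (t : List (Int × Int)),
    pvBGo lines j = (s, e) :: t → j ≤ s := by
  induction lines with
  | nil => intro j s e t h; simp [pvBGo] at h
  | cons l rest ih =>
    intro j s e t h
    simp only [pvBGo] at h
    by_cases hi : pvIsImp l
    · simp only [hi, if_true] at h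
      cases hb : pvBGo rest (j + 1) with
      | nil => simp [hb] at h; omega
      | cons p bs =>
        obtain ⟨s', e'⟩ := p
        have hs' := ih (j + 1) s' e' bs hb
        rw [hb] at h
        by_cases hs : s' = j + 1 <;> simp [hs] at h <;> omega
    · simp only [hi, if_false] at h
      have := ih (j + 1) s e t h
      omega

lemma pvAGo_eq (lines : List String) : ∀ (i : Int) (start : Option Int) (blocks : List (Int × Int)),
    pvAGo lines i start blocks =
      blocks ++ (match start with
                 | none => pvBGo lines i
                 | some s => pvMerge s i (pvBGo lines i)) := by
  induction lines with
  | nil =>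
    intro i start blocks
    cases start <;> simp [pvAGo, pvBGo, pvMerge]
  | cons l rest ih =>
    intro i start blocks
    by_cases hi : pvIsImp l
    · cases start with
      | none =>
        simp only [pvAGo, hi, if_true]
        rw [ih]
        simp only [pvBGo, hi, if_true]
        cases hb : pvBGo rest (i + 1) with
        | nil => simp [pvMerge]
        | cons p bs =>
          obtain ⟨s', e'⟩ := p
          by_cases hs : s' = i + 1 <;> simp [pvMerge, hs]
      | some s =>
        simp only [pvAGo, hi, if_true]
        rw [ih]
        simp only [pvBGo, hi, if_true]
        cases hb : pvBGo rest (i + 1) with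
        | nil => simp [pvMerge]
        | cons p bs =>
          obtain ⟨s', e'⟩ := p
          by_cases hs : s' = i + 1 <;> simp [pvMerge, hs]
    · cases start with
      | none =>
        simp [pvAGo, pvBGo, hi, ih]
      | some s =>
        have hA : pvAGo (l :: rest) i (some s) blocks = pvAGo rest (i + 1) none (blocks ++ [(s, i)]) := by
          simp [pvAGo, hi]
        have hB : pvBGo (l :: rest) i = pvBGo rest (i + 1) := by simp [pvBGo, hi]
        rw [hA, ih, hB]
        cases hb : pvBGo rest (i + 1) with
        | nil => simp [pvMerge]
        | cons p bs =>
          obtain ⟨s', e'⟩ := p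
          have hge := pvBGo_head_ge rest (i + 1) s' e' bs hb
          have hne : s' ≠ i := by omega
          simp [pvMerge, hne]


-- ===== VERDICT (by name: the statement is the Claim_ definition above) =====
theorem find_import_blocks_py_spec : Claim_equal_find_import_blocks_py := by
  intro lines _
  unfold Spec_find_import_blocks_py find_import_blocks_py find_import_blocks_py_alt
  rw [pvAGo_eq]
  simp
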